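-- pv_equiv track=rewrite | github.com/Junkang123456/harmony-migration-toolkit | bundled_spec_tools/extractors/function_graph_extractor.py | _pos_of_line
-- ===== SOURCE A (Python) =====
-- def _pos_of_line(source: str, line: int) -> int:
--     if line <= 1:
--         return 0
--     pos = 0
--     for _ in range(line - 1):
--         nxt = source.find("\n", pos)
--         if nxt == -1:
--             return len(source)
--         pos = nxt + 1
--     return pos
-- ===== SOURCE B (Python) =====
-- def _pos_of_line(source: str, line: int) -> int:
--     if line <= 1:
--         return 0
--     remaining = line - 1
--     pos = 0
--     for ch in source:
--         pos += 1
--         if ch == "\n":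
--             remaining -= 1
--             if remaining == 0:
--                 return pos
--     return len(source)
-- ===== Notes on version B (the rewrite author's own statement) =====
-- stated objective: alternative
-- what changed: Replaces the loop of repeated source.find('\n', pos) calls with a single character-by-character scan that counts newlines and returns as soon as the (line-1)-th one is passed.
import Mathlib
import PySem

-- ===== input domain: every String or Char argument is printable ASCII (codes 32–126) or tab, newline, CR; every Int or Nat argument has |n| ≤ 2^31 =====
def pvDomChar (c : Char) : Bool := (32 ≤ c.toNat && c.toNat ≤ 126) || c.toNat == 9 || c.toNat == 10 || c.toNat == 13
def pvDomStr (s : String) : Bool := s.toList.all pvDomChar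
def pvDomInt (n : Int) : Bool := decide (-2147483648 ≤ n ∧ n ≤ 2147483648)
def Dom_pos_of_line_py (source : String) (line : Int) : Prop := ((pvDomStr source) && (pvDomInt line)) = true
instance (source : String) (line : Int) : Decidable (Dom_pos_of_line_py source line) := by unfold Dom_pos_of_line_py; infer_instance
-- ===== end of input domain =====

-- B replaces A's loop of repeated source.find('\n', pos) jumps by one plain character scan
-- that counts newlines (alternative decomposition; same linear cost).

-- ===== PORT A =====
-- A's `for _ in range(line - 1)` with early returns, as fuel recursion on the loop counter.
def posOfLineGoA (s : List Char) : Nat → Int → Int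
  | 0, pos => pos
  | n + 1, pos =>
    let nxt := PySem.Chars.findFrom s ['\n'] pos none
    if nxt = -1 then (s.length : Int) else posOfLineGoA s n (nxt + 1)

def pos_of_line_py (source : String) (line : Int) : Int :=
  if line ≤ 1 then 0
  else posOfLineGoA source.toList (line - 1).toNat 0

-- ===== PORT B =====
-- B's `for ch in source` scan with its pos/remaining counters and early return.
def posOfLineGoB (total : Int) : List Char → Int → Int → Int
  | [], _, _ => total
  | c :: rest, pos, remaining =>
    if c = '\n' then
      if remaining - 1 = 0 then pos + 1 else posOfLineGoB total rest (pos + 1) (remaining - 1)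
    else posOfLineGoB total rest (pos + 1) remaining

def pos_of_line_py_alt (source : String) (line : Int) : Int :=
  if line ≤ 1 then 0
  else posOfLineGoB (source.toList.length : Int) source.toList 0 (line - 1)

-- ===== PRECONDITION & SPEC =====
def Spec_pos_of_line_py (source : String) (line : Int) (out : Int) : Prop := out = pos_of_line_py_alt source line
instance (source : String) (line : Int) (out : Int) : Decidable (Spec_pos_of_line_py source line out) := by unfold Spec_pos_of_line_py; infer_instance

-- ===== CLAIM (what is proved, stated in full; the proofs are below) =====
def Claim_equal_pos_of_line_py : Prop := ∀ (source : String) (line : Int), Dom_pos_of_line_py source line → Spec_pos_of_line_py source line (pos_of_line_py source line)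

-- ===== LEMMAS AND PROOFS =====

theorem singleton_prefix_iff {α : Type} (a : α) (u : List α) :
    [a] <+: u ↔ ∃ v, u = a :: v := by
  constructor
  · rintro ⟨v, rfl⟩; exact ⟨v, rfl⟩
  · rintro ⟨v, rfl⟩; exact ⟨v, rfl⟩

theorem singleton_infix_iff {α : Type} (a : α) (l : List α) :
    [a] <:+: l ↔ a ∈ l := by
  constructor
  · rintro ⟨s, t, rfl⟩; simp
  · intro h
    obtain ⟨s, t, rfl⟩ := List.append_of_mem h
    exact ⟨s, t, by simp⟩

-- no newline in t → B's scan runs off the end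
theorem scan_no_newline (total : Int) (t : List Char) (h : '\n' ∉ t) (pos r : Int) :
    posOfLineGoB total t pos r = total := by
  induction t generalizing pos r with
  | nil => rfl
  | cons c rest ih =>
    simp only [List.mem_cons, not_or] at h
    simp only [posOfLineGoB, if_neg (Ne.symm h.1)]
    exact ih h.2 _ _

-- B's scan across a newline-free block u followed by '\n'
theorem scan_to_newline (total : Int) (u v : List Char) (hu : '\n' ∉ u) (pos r : Int) :
    posOfLineGoB total (u ++ '\n' :: v) pos r =
      if r = 1 then pos + u.length + 1 else posOfLineGoB total v (pos + u.length + 1) (r - 1) := by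
  induction u generalizing pos with
  | nil =>
    simp only [List.nil_append, posOfLineGoB, List.length_nil]
    by_cases hr : r = 1
    · simp [hr]
    · have : r - 1 ≠ 0 := by omega
      simp [hr, this]
  | cons c rest ih =>
    simp only [List.mem_cons, not_or] at hu
    simp only [List.cons_append, posOfLineGoB, if_neg (Ne.symm hu.1)]
    rw [ih hu.2]
    simp only [List.length_cons]
    have h1 : pos + 1 + (rest.length : Int) + 1 = pos + ((rest.length : Nat) + 1 : Nat) + 1 := by
      push_cast; ring
    rw [h1]

-- where find points: first newline, nothing before it, and the decomposition of t around it
theorem find_newline_decomp (t : List Char) (hfind : PySem.Chars.find t ['\n'] ≠ -1) :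
    (PySem.Chars.find t ['\n']).toNat < t.length ∧
    '\n' ∉ t.take (PySem.Chars.find t ['\n']).toNat ∧
    t = t.take (PySem.Chars.find t ['\n']).toNat ++
        '\n' :: t.drop ((PySem.Chars.find t ['\n']).toNat + 1) := by
  set j := (PySem.Chars.find t ['\n']).toNat with hj
  have hnn : 0 ≤ PySem.Chars.find t ['\n'] := by
    have := PySem.Chars.neg_one_le_find t ['\n']
    omega
  obtain ⟨hpre, hmin⟩ := PySem.Chars.find_spec (s := t) (sub := ['\n']) hnn
  obtain ⟨v, hv⟩ := (singleton_prefix_iff _ _).mp hpre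
  have hjlen : j < t.length := by
    by_contra h
    rw [List.drop_eq_nil_of_le (by omega)] at hv
    simp at hv
  have hvdrop : t.drop (j + 1) = v := by
    have : t.drop (j + 1) = (t.drop j).drop 1 := by
      rw [List.drop_drop]
    rw [this, hv]
    rfl
  refine ⟨hjlen, ?_, ?_⟩
  · intro hmem
    obtain ⟨i, hi, hget⟩ := List.getElem_of_mem hmem
    have hij : i < j := by
      have := List.length_take_le j t
      simp only [List.length_take] at hi
      omega
    refine hmin i hij ?_
    rw [singleton_prefix_iff]
    refine ⟨t.drop (i + 1), ?_⟩
    rw [List.drop_eq_getElem_cons (by omega)]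
    have : t[i] = '\n' := by
      rw [← hget, List.getElem_take]
    rw [this]
  · conv_lhs => rw [← List.take_append_drop j t]
    rw [hv, hvdrop]

theorem goA_eq_goB (s : List Char) (n : Nat) (hn : 1 ≤ n) (k : Nat) (hk : k ≤ s.length) :
    posOfLineGoA s n (k : Int) = posOfLineGoB (s.length : Int) (s.drop k) (k : Int) (n : Int) := by
  induction n generalizing k with
  | zero => omega
  | succ n ih =>
    simp only [posOfLineGoA]
    rw [PySem.Chars.findFrom_natCast s ['\n'] k hk]
    by_cases hf : PySem.Chars.find (s.drop k) ['\n'] = -1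
    · rw [hf]
      norm_num
      have hno : '\n' ∉ s.drop k := by
        rw [PySem.Chars.find_eq_neg_one_iff] at hf
        intro hmem
        exact hf ((singleton_infix_iff '\n' (s.drop k)).mpr hmem)
      rw [scan_no_newline _ _ hno]
    · obtain ⟨hjlen, hnotake, hdec⟩ := find_newline_decomp (s.drop k) hf
      set j := (PySem.Chars.find (s.drop k) ['\n']).toNat with hjdef
      have hfnn : 0 ≤ PySem.Chars.find (s.drop k) ['\n'] := by
        have := PySem.Chars.neg_one_le_find (s.drop k) ['\n']
        omega
      have hfj : PySem.Chars.find (s.drop k) ['\n'] = (j : Int) := by omega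
      have hne : ¬ ((k : Int) + PySem.Chars.find (s.drop k) ['\n'] = -1) := by omega
      rw [if_neg hf, if_neg hne]
      have hlen : (s.drop k).length = s.length - k := List.length_drop ..
      have htake : (List.take j (s.drop k)).length = j := by
        simp only [List.length_take]
        omega
      -- rewrite the RHS along the decomposition of s.drop k
      conv_rhs => rw [hdec]
      rw [scan_to_newline _ _ _ hnotake, htake]
      have hdd : (s.drop k).drop (j + 1) = s.drop (k + j + 1) := by
        rw [List.drop_drop, ← Nat.add_assoc]
      rw [hfj]
      by_cases hn0 : n = 0
      · subst hn0
        simp [posOfLineGoA]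
      · have hrne : ¬ (((n + 1 : Nat) : Int) = 1) := by
          push_cast; omega
        rw [if_neg hrne]
        have hk' : k + j + 1 ≤ s.length := by omega
        have := ih (by omega) (k + j + 1) hk'
        rw [hdd]
        have hcast1 : (k : Int) + (j : Int) + 1 = ((k + j + 1 : Nat) : Int) := by push_cast; ring
        have hcast2 : ((n + 1 : Nat) : Int) - 1 = ((n : Nat) : Int) := by push_cast; ring
        rw [hcast1, hcast2]
        exact this

theorem pos_of_line_eq (source : String) (line : Int) :
    pos_of_line_py source line = pos_of_line_py_alt source line := by
  unfold pos_of_line_py pos_of_line_py_alt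
  by_cases h : line ≤ 1
  · simp [h]
  · have hn : 1 ≤ (line - 1).toNat := by omega
    have hcast : (((line - 1).toNat : Nat) : Int) = line - 1 := by omega
    rw [if_neg h, if_neg h]
    have := goA_eq_goB source.toList (line - 1).toNat hn 0 (Nat.zero_le _)
    rw [Nat.cast_zero, hcast, List.drop_zero] at this
    exact this

-- ===== VERDICT (by name: the statement is the Claim_ definition above) =====
theorem pos_of_line_py_spec : Claim_equal_pos_of_line_py := by
  intro source line _
  unfold Spec_pos_of_line_py
  exact pos_of_line_eq source line
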